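-- pv_equiv track=rewrite | github.com/brendenwest/adventofcode2019 | day4/password.py | isValid1
-- ===== SOURCE A (Python) =====
-- def isValid1(password):
--     hasDouble = False
--     prev = ""
--     for c in str(password):
--         if len(prev) > 0 and int(c) < int(prev):
--             return False
--         if c == prev:
--             hasDouble = True
--         prev = c
--     return hasDouble
-- ===== SOURCE B (Python) =====
-- def isValid1(password):
--     n = password
--     double = False
--     while n >= 10:
--         n, d = divmod(n, 10)
--         if n % 10 > d:
--             return False
--         if n % 10 == d:
--             double = True
--     return double
-- ===== Notes on version B (the rewrite author's own statement) =====
-- stated objective: alternative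
-- what changed: Replaces A's string scan (str(password), per-character int() conversions, prev/hasDouble state) with pure integer arithmetic: a divmod-by-10 loop that peels digits from the least significant end and compares each digit with the next more significant one, never building a string.
import Mathlib
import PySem

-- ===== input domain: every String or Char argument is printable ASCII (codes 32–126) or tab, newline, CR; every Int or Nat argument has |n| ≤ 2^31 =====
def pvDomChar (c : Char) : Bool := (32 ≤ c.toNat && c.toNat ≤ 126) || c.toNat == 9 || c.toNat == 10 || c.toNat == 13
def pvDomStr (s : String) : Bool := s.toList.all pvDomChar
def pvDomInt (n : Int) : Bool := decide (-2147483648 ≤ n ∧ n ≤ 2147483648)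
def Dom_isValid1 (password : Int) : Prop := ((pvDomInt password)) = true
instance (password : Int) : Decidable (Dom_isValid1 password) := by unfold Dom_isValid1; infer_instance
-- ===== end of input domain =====

-- B replaces A's string scan (str + per-character int()) by a pure integer divmod-by-10
-- loop that peels digits from the least significant end; a different algorithm, same cost.

-- ===== PORT A =====
-- int(c) for a one-character string; the getD 0 default is only reached where
-- Python's int() would raise ValueError, which Pre_isValid1 excludes.
def pyIntChar (s : String) : Int := (PySem.Int.ofStr? s).getD 0

-- the for-loop of A: state = (hasDouble, prev)
def isValid1Loop : List Char → Bool → String → Bool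
  | [], hasDouble, _ => hasDouble
  | c :: cs, hasDouble, prev =>
    if PySem.Str.len prev > 0 ∧ pyIntChar (String.ofList [c]) < pyIntChar prev then
      false
    else
      isValid1Loop cs (if String.ofList [c] == prev then true else hasDouble) (String.ofList [c])

def isValid1 (password : Int) : Bool :=
  isValid1Loop (PySem.Int.toStr password).toList false ""

-- ===== PORT B =====
-- the while-loop of Source B: state = (n, double); n, d = divmod(n, 10)
def isValid1AltLoop (n : Int) (double : Bool) : Bool :=
  if 10 ≤ n then
    let n' := PySem.Int.floordiv n 10
    let d := PySem.Int.mod n 10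
    if PySem.Int.mod n' 10 > d then false
    else isValid1AltLoop n' (if PySem.Int.mod n' 10 == d then true else double)
  else double
termination_by n.toNat
decreasing_by
  rw [PySem.Int.floordiv_eq_ediv_of_pos (by omega)]
  omega

def isValid1_alt (password : Int) : Bool :=
  isValid1AltLoop password false

-- ===== PRECONDITION & SPEC =====
-- Pre_ excludes negative passwords: str(password) then starts with '-', on which
-- Python's int(c) raises ValueError in A.
def Pre_isValid1 (password : Int) : Prop := 0 ≤ password
instance (password : Int) : Decidable (Pre_isValid1 password) := by unfold Pre_isValid1; infer_instance
def pvWitness_isValid1 : Int := (122345)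

def Spec_isValid1 (password : Int) (out : Bool) : Prop := out = isValid1_alt password
instance (password : Int) (out : Bool) : Decidable (Spec_isValid1 password out) := by unfold Spec_isValid1; infer_instance

-- ===== CLAIM (what is proved, stated in full; the proofs are below) =====
def Claim_equal_isValid1 : Prop := ∀ (password : Int), Dom_isValid1 password → Pre_isValid1 password → Spec_isValid1 password (isValid1 password)

-- ===== LEMMAS AND PROOFS =====

-- the decimal digits of m, most significant first
def natDigits (m : Nat) : List Nat :=
  if _h : m < 10 then [m] else natDigits (m / 10) ++ [m % 10]
decreasing_by omega

-- some adjacent pair decreases (next digit smaller than the previous one)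
def hasDec : List Nat → Bool
  | a :: b :: t => decide (b < a) || hasDec (b :: t)
  | _ => false

-- some adjacent pair is equal
def hasEq : List Nat → Bool
  | a :: b :: t => (a == b) || hasEq (b :: t)
  | _ => false

theorem natDigits_step (m : Nat) (h : ¬ m < 10) :
    natDigits m = natDigits (m / 10) ++ [m % 10] := by
  conv_lhs => rw [natDigits]
  rw [dif_neg h]

theorem natDigits_ne_nil (m : Nat) : natDigits m ≠ [] := by
  unfold natDigits; split <;> simp

theorem natDigits_mem_lt (m : Nat) : ∀ x ∈ natDigits m, x < 10 := by
  induction m using Nat.strong_induction_on with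
  | _ m ih =>
    unfold natDigits
    split
    · intro x hx; simp at hx; omega
    · intro x hx
      simp only [List.mem_append, List.mem_singleton] at hx
      rcases hx with h | h
      · exact ih (m / 10) (by omega) x h
      · omega

theorem natDigits_getLast (m : Nat) (h : natDigits m ≠ []) :
    (natDigits m).getLast h = m % 10 := by
  revert h
  unfold natDigits
  split <;> intro h
  · simp; omega
  · simp

-- accumulator lemma for Nat.toDigitsCore
theorem toDigitsCore_acc (f : Nat) : ∀ (n : Nat) (ds : List Char),
    Nat.toDigitsCore 10 f n ds = Nat.toDigitsCore 10 f n [] ++ ds := by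
  induction f with
  | zero => intro n ds; simp [Nat.toDigitsCore]
  | succ f ih =>
    intro n ds
    simp only [Nat.toDigitsCore]
    split
    · rfl
    · rw [ih (n / 10) (Nat.digitChar (n % 10) :: ds),
          ih (n / 10) [Nat.digitChar (n % 10)], List.append_assoc]
      rfl

-- sufficient fuel is irrelevant
theorem toDigitsCore_fuel (n : Nat) : ∀ f, n < f →
    Nat.toDigitsCore 10 f n [] = Nat.toDigits 10 n := by
  induction n using Nat.strong_induction_on with
  | _ n ih =>
    intro f hf
    match f, hf with
    | f + 1, hf =>
      show Nat.toDigitsCore 10 (f + 1) n [] = Nat.toDigitsCore 10 (n + 1) n []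
      simp only [Nat.toDigitsCore]
      split
      · rfl
      · rename_i hq
        rw [toDigitsCore_acc, toDigitsCore_acc (n := n / 10) (ds := [Nat.digitChar (n % 10)]),
            ih (n / 10) (by omega) f (by omega), ih (n / 10) (by omega) n (by omega)]

theorem toDigits_step (n : Nat) (h : 10 ≤ n) :
    Nat.toDigits 10 n = Nat.toDigits 10 (n / 10) ++ [Nat.digitChar (n % 10)] := by
  show Nat.toDigitsCore 10 (n + 1) n [] = _
  simp only [Nat.toDigitsCore]
  rw [if_neg (by omega)]
  rw [toDigitsCore_acc, toDigitsCore_fuel (n / 10) n (by omega)]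

theorem toDigits_small (n : Nat) (h : n < 10) :
    Nat.toDigits 10 n = [Nat.digitChar n] := by
  show Nat.toDigitsCore 10 (n + 1) n [] = _
  simp only [Nat.toDigitsCore]
  rw [if_pos (by omega), Nat.mod_eq_of_lt h]

theorem toDigits_eq_map (m : Nat) :
    Nat.toDigits 10 m = (natDigits m).map Nat.digitChar := by
  induction m using Nat.strong_induction_on with
  | _ m ih =>
    unfold natDigits
    split
    · rename_i h; simp [toDigits_small m h]
    · rename_i h
      rw [toDigits_step m (by omega), ih (m / 10) (by omega)]
      simp

theorem pyIntChar_digitChar (x : Nat) (h : x < 10) :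
    pyIntChar (String.ofList [Nat.digitChar x]) = (x : Int) := by
  interval_cases x <;> decide

theorem digitChar_str_beq (a b : Nat) (ha : a < 10) (hb : b < 10) :
    (String.ofList [Nat.digitChar a] == String.ofList [Nat.digitChar b]) = (a == b) := by
  interval_cases a <;> interval_cases b <;> decide

theorem len_single_pos (p : Char) : PySem.Str.len (String.ofList [p]) > 0 := by
  simp [PySem.Str.len]

theorem hasDec_append (ds : List Nat) (h : ds ≠ []) (d : Nat) :
    hasDec (ds ++ [d]) = (hasDec ds || decide (d < ds.getLast h)) := by
  induction ds with
  | nil => exact absurd rfl h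
  | cons a t ih =>
    match t with
    | [] => simp [hasDec]
    | b :: t' =>
      rw [show hasDec ((a :: b :: t') ++ [d]) =
            (decide (b < a) || hasDec ((b :: t') ++ [d])) from rfl,
          ih (by simp)]
      simp [hasDec, List.getLast_cons, Bool.or_assoc]

theorem hasEq_append (ds : List Nat) (h : ds ≠ []) (d : Nat) :
    hasEq (ds ++ [d]) = (hasEq ds || (ds.getLast h == d)) := by
  induction ds with
  | nil => exact absurd rfl h
  | cons a t ih =>
    match t with
    | [] => simp [hasEq]
    | b :: t' =>
      rw [show hasEq ((a :: b :: t') ++ [d]) =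
            ((a == b) || hasEq ((b :: t') ++ [d])) from rfl,
          ih (by simp)]
      simp [hasEq, List.getLast_cons, Bool.or_assoc]

-- A's loop on a list of digit characters, with a one-digit prev
theorem loopA_eq (ds : List Nat) : ∀ (_hlt : ∀ x ∈ ds, x < 10) (hd : Bool) (p : Nat), p < 10 →
    isValid1Loop (ds.map Nat.digitChar) hd (String.ofList [Nat.digitChar p]) =
      if hasDec (p :: ds) then false else hd || hasEq (p :: ds) := by
  induction ds with
  | nil => intro _ hd p _; simp [isValid1Loop, hasDec, hasEq]
  | cons c rest ih =>
    intro hlt hd p hp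
    have hc : c < 10 := hlt c (by simp)
    rw [List.map_cons,
        show isValid1Loop (Nat.digitChar c :: rest.map Nat.digitChar) hd
              (String.ofList [Nat.digitChar p]) =
          (if PySem.Str.len (String.ofList [Nat.digitChar p]) > 0 ∧
              pyIntChar (String.ofList [Nat.digitChar c]) <
                pyIntChar (String.ofList [Nat.digitChar p]) then false
           else isValid1Loop (rest.map Nat.digitChar)
                  (if String.ofList [Nat.digitChar c] == String.ofList [Nat.digitChar p]
                   then true else hd)
                  (String.ofList [Nat.digitChar c])) from rfl,
        pyIntChar_digitChar c hc, pyIntChar_digitChar p hp,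
        digitChar_str_beq c p hc hp]
    rw [show hasDec (p :: c :: rest) = (decide (c < p) || hasDec (c :: rest)) from rfl,
        show hasEq (p :: c :: rest) = ((p == c) || hasEq (c :: rest)) from rfl]
    by_cases hcp : c < p
    · rw [if_pos ⟨len_single_pos _, by exact_mod_cast hcp⟩]
      simp [hcp]
    · rw [if_neg (fun hh => hcp (by exact_mod_cast hh.2)),
          ih (fun x hx => hlt x (by simp [hx])) _ c hc]
      have : (decide (c < p)) = false := by simp [hcp]
      by_cases hEq : c = p
      · subst hEq; simp
      · have h1 : (c == p) = false := by simp [hEq]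
        have h2 : (p == c) = false := by simp [Ne.symm hEq]
        simp [this, h1, h2]

-- B's loop computes the same predicate over the digits of n
theorem loopB_eq (m : Nat) : ∀ (db : Bool),
    isValid1AltLoop (m : Int) db =
      if hasDec (natDigits m) then false else db || hasEq (natDigits m) := by
  induction m using Nat.strong_induction_on with
  | _ m ih =>
    intro db
    by_cases h : m < 10
    · rw [isValid1AltLoop, if_neg (by exact_mod_cast (by omega : ¬ (10 ≤ (m : Int))))]
      unfold natDigits
      rw [dif_pos h]
      simp [hasDec, hasEq]
    · have hfd : PySem.Int.floordiv (m : Int) 10 = ((m / 10 : Nat) : Int) := by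
        exact_mod_cast PySem.Int.floordiv_natCast m 10
      have hmod : PySem.Int.mod (m : Int) 10 = ((m % 10 : Nat) : Int) := by
        exact_mod_cast PySem.Int.mod_natCast m 10
      have hmod' : PySem.Int.mod ((m / 10 : Nat) : Int) 10 = ((m / 10 % 10 : Nat) : Int) := by
        exact_mod_cast PySem.Int.mod_natCast (m / 10) 10
      have hnn : natDigits (m / 10) ≠ [] := natDigits_ne_nil _
      have hlast : (natDigits (m / 10)).getLast hnn = m / 10 % 10 := natDigits_getLast _ _
      rw [isValid1AltLoop, if_pos (by exact_mod_cast (by omega : 10 ≤ (m : Int)))]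
      simp only [hfd, hmod, hmod']
      rw [ih (m / 10) (by omega)]
      conv_rhs => rw [natDigits_step m (by omega)]
      rw [hasDec_append _ hnn, hasEq_append _ hnn, hlast]
      by_cases hgt : m % 10 < m / 10 % 10
      · rw [if_pos (by exact_mod_cast hgt)]
        simp [hgt]
      · rw [if_neg (by exact_mod_cast hgt)]
        have hdec : (decide (m % 10 < m / 10 % 10)) = false := by simp [hgt]
        by_cases hEq : m / 10 % 10 = m % 10
        · have : (((m / 10 % 10 : Nat) : Int) == ((m % 10 : Nat) : Int)) = true := by
            simp [hEq]
          rw [this]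
          simp [hEq, Bool.or_comm]
        · have : (((m / 10 % 10 : Nat) : Int) == ((m % 10 : Nat) : Int)) = false := by
            simp; exact_mod_cast hEq
          rw [this]
          have h2 : ((m / 10 % 10 : Nat) == (m % 10 : Nat)) = false := by simp [hEq]
          simp [hdec, h2, Bool.or_comm]

-- ===== VERDICT (by name: the statements are the Claim_ definitions above) =====
theorem isValid1_spec : Claim_equal_isValid1 := by
  intro password _ hpre
  unfold Pre_isValid1 at hpre
  unfold Spec_isValid1 isValid1 isValid1_alt
  have hm : password = ((password.toNat : Nat) : Int) := by omega
  rw [PySem.Int.toList_toStr]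
  rw [show PySem.Int.toChars password = Nat.toDigits 10 password.toNat by
    unfold PySem.Int.toChars; rw [if_neg (by omega)]]
  rw [toDigits_eq_map]
  rcases hds : natDigits password.toNat with _ | ⟨c, cs⟩
  · exact absurd hds (natDigits_ne_nil _)
  · have hlt : ∀ x ∈ natDigits password.toNat, x < 10 := natDigits_mem_lt _
    rw [hds] at hlt
    have hc : c < 10 := hlt c (by simp)
    -- first iteration of A: prev = "", so it only sets prev := c
    have hne : String.ofList [Nat.digitChar c] ≠ "" := by
      intro hs; simpa using congrArg String.toList hs
    rw [List.map_cons,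
        show isValid1Loop (Nat.digitChar c :: cs.map Nat.digitChar) false "" =
          isValid1Loop (cs.map Nat.digitChar) false (String.ofList [Nat.digitChar c]) by
          simp [isValid1Loop, PySem.Str.len, hne]]
    rw [loopA_eq cs (fun x hx => hlt x (by simp [hx])) false c hc]
    conv_rhs => rw [hm]
    rw [loopB_eq password.toNat false, hds]
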